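-- pv_equiv track=rewrite | github.com/alexlvz/Index-Generator | data_encoder_decoder.py | build_differential_list
-- ===== SOURCE A (Python) =====
-- def build_differential_list(list_doc,encode):
--
--     list_differential=[list_doc[0]]
--     num_loop = len(list_doc)
--     for i in range(1,num_loop):
--         if i%2==0:
--             if encode ==True:
--                 dif = list_doc[i] - list_doc[i - 2]
--             else:
--                 dif = list_doc[i] + list_differential[- 2]
--         else:
--             dif = list_doc[i]
--         list_differential.append(dif)
--
--     return list_differential
-- ===== SOURCE B (Python) =====
-- def build_differential_list(list_doc, encode):
--     # parity split
--     even, odd = [], []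
--     take_even = True
--     for v in list_doc:
--         if take_even:
--             even.append(v)
--         else:
--             odd.append(v)
--         take_even = not take_even
--     # chain over the even-positioned subsequence
--     if encode == True:
--         chain = even[:1]
--         for prev, cur in zip(even, even[1:]):
--             chain.append(cur - prev)
--     else:
--         chain = []
--         total = 0
--         for v in even:
--             total += v
--             chain.append(total)
--     # interleave chain with the odd-positioned values
--     out = []
--     for c, o in zip(chain, odd):
--         out += [c, o]
--     if len(odd) < len(chain):
--         out.append(chain[-1])
--     return out
-- ===== Notes on version B (the rewrite author's own statement) =====
-- stated objective: alternative
-- what changed: A builds the output in one indexed loop with branch-per-index and a negative lookback into its own accumulator; B splits the input by parity, computes the even-position chain as first-differences (encode) or prefix sums (decode) of that subsequence alone, and re-interleaves it with the untouched odd-position values.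
import Mathlib
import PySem

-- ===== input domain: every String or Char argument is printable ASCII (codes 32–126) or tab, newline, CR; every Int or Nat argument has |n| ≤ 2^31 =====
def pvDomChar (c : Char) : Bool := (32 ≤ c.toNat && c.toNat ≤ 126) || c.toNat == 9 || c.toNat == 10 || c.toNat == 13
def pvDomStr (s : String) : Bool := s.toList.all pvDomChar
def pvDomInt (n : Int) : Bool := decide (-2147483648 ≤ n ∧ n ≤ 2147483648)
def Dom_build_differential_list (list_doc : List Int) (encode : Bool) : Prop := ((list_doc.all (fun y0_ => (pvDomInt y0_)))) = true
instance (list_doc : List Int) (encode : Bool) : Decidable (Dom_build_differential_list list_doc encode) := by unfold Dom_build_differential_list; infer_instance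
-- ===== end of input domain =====

-- B re-implements A by a parity split: the even-positioned subsequence is turned into its
-- first-differences (encode) or running prefix sums (decode) and re-interleaved with the
-- untouched odd-positioned values — an alternative decomposition, same cost.

-- ===== PORT A =====
-- loop body of A's 'for i in range(1, num_loop)' (acc = list_differential)
def pvABody (list_doc : List Int) (encode : Bool) (acc : List Int) (i : Int) : List Int :=
  let dif : Int :=
    if PySem.Int.mod i 2 == 0 then
      if encode == true then
        PySem.List.pyGetD list_doc i 0 - PySem.List.pyGetD list_doc (i - 2) 0
      else
        PySem.List.pyGetD list_doc i 0 + PySem.List.pyGetD acc (-2) 0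
    else
      PySem.List.pyGetD list_doc i 0
  acc ++ [dif]

def build_differential_list (list_doc : List Int) (encode : Bool) : List Int :=
  let init : List Int := [PySem.List.pyGetD list_doc 0 0]   -- list_doc[0]: IndexError on [] is excluded by Pre_
  (PySem.List.pyRange 1 (list_doc.length : Int) 1).foldl (pvABody list_doc encode) init

-- ===== PORT B =====
-- loop body of B's parity split (state: even, odd, take_even)
def pvSplitStep (s : List Int × List Int × Bool) (v : Int) : List Int × List Int × Bool :=
  if s.2.2 then (s.1 ++ [v], s.2.1, false) else (s.1, s.2.1 ++ [v], true)

def build_differential_list_alt (list_doc : List Int) (encode : Bool) : List Int :=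
  let s := list_doc.foldl pvSplitStep ([], [], true)
  let even := s.1
  let odd := s.2.1
  let chain : List Int :=
    if encode == true then
      (even.zip (even.drop 1)).foldl (fun ch p => ch ++ [p.2 - p.1]) (even.take 1)
    else
      (even.foldl (fun (t : List Int × Int) v => (t.1 ++ [t.2 + v], t.2 + v)) ([], 0)).1
  let out := (chain.zip odd).foldl (fun o p => o ++ [p.1, p.2]) []
  if odd.length < chain.length then out ++ [PySem.List.pyGetD chain (-1) 0] else out

-- ===== PRECONDITION & SPEC =====
-- A evaluates list_doc[0] first, so it raises IndexError exactly on the empty list.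
def Pre_build_differential_list (list_doc : List Int) (encode : Bool) : Prop := list_doc ≠ []
instance (list_doc : List Int) (encode : Bool) : Decidable (Pre_build_differential_list list_doc encode) := by unfold Pre_build_differential_list; infer_instance
def pvWitness_build_differential_list : List Int × Bool := ([3, 1, 4, 1, 5], true)

def Spec_build_differential_list (list_doc : List Int) (encode : Bool) (out : List Int) : Prop := out = build_differential_list_alt list_doc encode
instance (list_doc : List Int) (encode : Bool) (out : List Int) : Decidable (Spec_build_differential_list list_doc encode out) := by unfold Spec_build_differential_list; infer_instance

-- ===== CLAIM (what is proved, stated in full; the proofs are below) =====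
def Claim_equal_build_differential_list : Prop := ∀ (list_doc : List Int) (encode : Bool), Dom_build_differential_list list_doc encode → Pre_build_differential_list list_doc encode → Spec_build_differential_list list_doc encode (build_differential_list list_doc encode)
-- ===== LEMMAS AND PROOFS =====

def pvVal (en : Bool) (c e : Int) : Int := if en then e - c else c + e

def pvCarry (en : Bool) (c e : Int) : Int := if en then e else c + e

def pvRef (en : Bool) : Int → List Int → List Int
  | _, [] => []
  | c, [e] => [pvVal en c e]
  | c, e :: o :: rest => pvVal en c e :: o :: pvRef en (pvCarry en c e) rest

def pvEvens : List Int → List Int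
  | [] => []
  | [x] => [x]
  | x :: _ :: r => x :: pvEvens r

def pvOdds (xs : List Int) : List Int := pvEvens xs.tail

def pvChain (en : Bool) : Int → List Int → List Int
  | _, [] => []
  | c, e :: r => pvVal en c e :: pvChain en (pvCarry en c e) r

lemma pvEvens_cons (x : Int) (xs : List Int) : pvEvens (x :: xs) = x :: pvOdds xs := by
  cases xs <;> simp [pvEvens, pvOdds]

lemma pvFlag (n : Nat) : (!decide (n % 2 = 0)) = decide ((n+1) % 2 = 0) := by
  rw [← decide_not, decide_eq_decide]; omega

lemma pvSplit_fold (xs : List Int) : ∀ (e o : List Int),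
    (xs.foldl pvSplitStep (e, o, true) = (e ++ pvEvens xs, o ++ pvOdds xs, decide (xs.length % 2 = 0))
   ∧ xs.foldl pvSplitStep (e, o, false) = (e ++ pvOdds xs, o ++ pvEvens xs, !decide (xs.length % 2 = 0))) := by
  induction xs with
  | nil => simp [pvEvens, pvOdds]
  | cons x r ih =>
    intro e o
    constructor
    · show List.foldl pvSplitStep (pvSplitStep (e,o,true) x) r = _
      rw [show pvSplitStep (e,o,true) x = (e ++ [x], o, false) from rfl]
      rw [(ih (e ++ [x]) o).2]
      simp [pvEvens_cons, pvOdds, pvFlag]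
    · show List.foldl pvSplitStep (pvSplitStep (e,o,false) x) r = _
      rw [show pvSplitStep (e,o,false) x = (e, o ++ [x], true) from rfl]
      rw [(ih e (o ++ [x])).1]
      simp [pvEvens_cons, pvOdds]
      rw [← decide_not, decide_eq_decide]
      omega

lemma pvChain_enc_zip (r : List Int) : ∀ e : Int,
    ((e :: r).zip r).map (fun p => p.2 - p.1) = pvChain true e r := by
  induction r with
  | nil => intro e; rfl
  | cons y r ih => intro e; simp [pvChain, pvVal, pvCarry, ih y]

lemma pvChain_enc (ev : List Int) :
    (ev.zip (ev.drop 1)).foldl (fun ch p => ch ++ [p.2 - p.1]) (ev.take 1) = pvChain true 0 ev := by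
  cases ev with
  | nil => rfl
  | cons e r =>
    rw [PySem.List.foldl_append_singleton_eq_map]
    simp [pvChain, pvVal, pvCarry, pvChain_enc_zip r e]

lemma pvChain_dec (ev : List Int) : ∀ (acc : List Int) (t : Int),
    ev.foldl (fun (s : List Int × Int) v => (s.1 ++ [s.2 + v], s.2 + v)) (acc, t)
      = (acc ++ pvChain false t ev, t + ev.sum) := by
  induction ev with
  | nil => intro acc t; simp [pvChain]
  | cons e r ih =>
    intro acc t
    simp only [List.foldl_cons]
    rw [ih (acc ++ [t + e]) (t + e)]
    simp [pvChain, pvVal, pvCarry]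
    ring

lemma pvInterleave (en : Bool) (xs : List Int) : ∀ c : Int,
    (let ch := pvChain en c (pvEvens xs);
     let od := pvOdds xs;
     let flat := (ch.zip od).foldl (fun (o : List Int) p => o ++ [p.1, p.2]) [];
     if od.length < ch.length then flat ++ [PySem.List.pyGetD ch (-1) 0] else flat)
      = pvRef en c xs := by
  induction xs using pvEvens.induct with
  | case1 => intro c; simp [pvEvens, pvOdds, pvChain, pvRef]
  | case2 x => intro c; simp [pvEvens, pvOdds, pvChain, pvRef, PySem.List.pyGetD_neg_one]
  | case3 x y r ih =>
    intro c
    simp only [pvEvens_cons, pvOdds, List.tail_cons, pvEvens]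
    rw [show pvChain en c (x :: pvEvens r) = pvVal en c x :: pvChain en (pvCarry en c x) (pvEvens r) from rfl]
    rw [show pvRef en c (x :: y :: r) = pvVal en c x :: y :: pvRef en (pvCarry en c x) r from rfl]
    have hih := ih (pvCarry en c x)
    simp only [pvOdds] at hih
    rw [PySem.List.foldl_append_eq_flatMap] at hih ⊢
    simp only [List.zip_cons_cons, List.flatMap_cons, List.nil_append]
    by_cases hlen : (pvEvens r.tail).length < (pvChain en (pvCarry en c x) (pvEvens r)).length
    · have hne : pvChain en (pvCarry en c x) (pvEvens r) ≠ [] := by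
        intro h0; rw [h0] at hlen; simp at hlen
      rw [if_pos (by simpa using hlen)]
      rw [if_pos hlen] at hih
      rw [PySem.List.pyGetD_neg_one _ 0 (List.cons_ne_nil _ _), List.getLast_cons hne,
          ← PySem.List.pyGetD_neg_one _ 0 hne]
      rw [← hih]
      simp
    · rw [if_neg (by simpa using hlen)]
      rw [if_neg hlen] at hih
      rw [← hih]
      simp

lemma pvRef_length (en : Bool) (xs : List Int) : ∀ c, (pvRef en c xs).length = xs.length := by
  induction xs using pvEvens.induct with
  | case1 => intro c; rfl
  | case2 x => intro c; rfl
  | case3 x y r ih => intro c; simp [pvRef, ih]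

lemma pvRef_get?_zero (en : Bool) (c x : Int) (xs : List Int) :
    (pvRef en c (x :: xs))[0]? = some (pvVal en c x) := by
  cases xs <;> rfl

lemma pvRef_get?_odd (en : Bool) (xs : List Int) : ∀ (c : Int) (i : Nat), i % 2 = 1 →
    (pvRef en c xs)[i]? = xs[i]? := by
  induction xs using pvEvens.induct with
  | case1 => intro c i _; simp [pvRef]
  | case2 x =>
    intro c i hodd
    rcases i with _ | i
    · omega
    · simp [pvRef]
  | case3 x y r ih =>
    intro c i hodd
    rcases i with _ | _ | i
    · omega
    · simp [pvRef]
    · simp only [pvRef, List.getElem?_cons_succ]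
      exact ih (pvCarry en c x) i (by omega)

lemma pvRef_get?_even_enc (xs : List Int) : ∀ (c : Int) (i : Nat), i % 2 = 0 →
    (pvRef true c xs)[i+2]? = (xs[i+2]?).bind (fun v => (xs[i]?).map (fun w => v - w)) := by
  induction xs using pvEvens.induct with
  | case1 => intro c i _; simp [pvRef]
  | case2 x => intro c i _; simp [pvRef]
  | case3 x y r ih =>
    intro c i heven
    rcases i with _ | _ | i
    · -- i = 0 : T[0]? where T = pvRef true x r
      simp only [pvRef, List.getElem?_cons_succ, List.getElem?_cons_zero]
      cases r with
      | nil => simp [pvRef]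
      | cons e rest =>
        rw [pvRef_get?_zero]
        simp [pvVal, pvCarry]
    · omega
    · simp only [pvRef, List.getElem?_cons_succ]
      exact ih (pvCarry true c x) i (by omega)

lemma pvRef_get?_even_dec (xs : List Int) : ∀ (c : Int) (i : Nat), i % 2 = 0 →
    (pvRef false c xs)[i+2]? = (xs[i+2]?).bind (fun v => ((pvRef false c xs)[i]?).map (fun w => v + w)) := by
  induction xs using pvEvens.induct with
  | case1 => intro c i _; simp [pvRef]
  | case2 x => intro c i _; simp [pvRef]
  | case3 x y r ih =>
    intro c i heven
    rcases i with _ | _ | i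
    · simp only [pvRef, List.getElem?_cons_succ, List.getElem?_cons_zero]
      cases r with
      | nil => simp [pvRef]
      | cons e rest =>
        rw [pvRef_get?_zero]
        simp [pvVal, pvCarry]
        ring
    · omega
    · simp only [pvRef, List.getElem?_cons_succ]
      exact ih (pvCarry false c x) i (by omega)

lemma pvA_step (doc : List Int) (en : Bool) (i : Nat) (h1 : 1 ≤ i) (h2 : i < doc.length) :
    pvABody doc en ((pvRef en 0 doc).take i) (i : Int) = (pvRef en 0 doc).take (i+1) := by
  have hF : (pvRef en 0 doc).length = doc.length := pvRef_length en doc 0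
  rw [List.take_add_one]
  unfold pvABody
  suffices hsome : (pvRef en 0 doc)[i]? =
      some (if PySem.Int.mod (i:Int) 2 == 0 then
              if en == true then
                PySem.List.pyGetD doc (i:Int) 0 - PySem.List.pyGetD doc ((i:Int) - 2) 0
              else
                PySem.List.pyGetD doc (i:Int) 0 + PySem.List.pyGetD ((pvRef en 0 doc).take i) (-2) 0
            else PySem.List.pyGetD doc (i:Int) 0) by
    rw [hsome]; rfl
  have hmod : PySem.Int.mod (i:Int) 2 = ((i % 2 : Nat) : Int) := by
    rw [PySem.Int.mod_eq_emod_of_pos (by norm_num)]; omega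
  have hdocget : PySem.List.pyGetD doc (i:Int) 0 = doc[i]'h2 := by
    rw [PySem.List.pyGetD_natCast, List.getD_eq_getElem?_getD, List.getElem?_eq_getElem h2]
    rfl
  by_cases hpar : i % 2 = 0
  · -- even, hence i ≥ 2
    have hi2 : 2 ≤ i := by omega
    obtain ⟨j, hj⟩ : ∃ j, i = j + 2 := ⟨i - 2, by omega⟩
    have hcond : (PySem.Int.mod (i:Int) 2 == 0) = true := by rw [hmod, hpar]; rfl
    rw [hcond, if_pos rfl]
    have hjget : PySem.List.pyGetD doc ((i:Int) - 2) 0 = doc[j]'(by omega) := by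
      have : (i:Int) - 2 = ((j : Nat) : Int) := by omega
      rw [this, PySem.List.pyGetD_natCast, List.getD_eq_getElem?_getD,
          List.getElem?_eq_getElem (by omega : j < doc.length)]
      rfl
    cases en with
    | true =>
      simp only [BEq.rfl, if_pos]
      subst hj
      rw [pvRef_get?_even_enc doc 0 j (by omega)]
      rw [List.getElem?_eq_getElem h2, List.getElem?_eq_getElem (by omega : j < doc.length)]
      simp only [Option.bind_some, Option.map_some]
      rw [hdocget, hjget]
    | false =>
      rw [if_neg (by simp)]
      have htklen : ((pvRef false 0 doc).take i).length = i := by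
        simp [pvRef_length]; omega
      have hacc : PySem.List.pyGetD ((pvRef false 0 doc).take i) (-2) 0
          = (pvRef false 0 doc)[j]'(by omega) := by
        rw [PySem.List.pyGetD_neg_ofNat _ 2 0 (by norm_num) (by rw [htklen]; omega)]
        rw [List.getElem_take]
        congr 1
        rw [htklen]
        omega
      subst hj
      rw [pvRef_get?_even_dec doc 0 j (by omega)]
      rw [List.getElem?_eq_getElem h2,
          List.getElem?_eq_getElem (show j < (pvRef false 0 doc).length by omega)]
      simp only [Option.bind_some, Option.map_some]
      rw [hdocget, hacc]
  · have hcond : (PySem.Int.mod (i:Int) 2 == 0) = false := by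
      rw [hmod]
      have : i % 2 = 1 := by omega
      rw [this]; rfl
    rw [hcond]
    rw [pvRef_get?_odd en doc 0 i (by omega), List.getElem?_eq_getElem h2, hdocget]
    simp

lemma pvA_loop (doc : List Int) (en : Bool) : ∀ (k i : Nat), 1 ≤ i → i + k = doc.length →
    (PySem.List.pyRange (i : Int) (doc.length : Int) 1).foldl (pvABody doc en) ((pvRef en 0 doc).take i)
      = pvRef en 0 doc := by
  intro k
  induction k with
  | zero =>
    intro i h1 h2
    rw [PySem.List.pyRange_one_eq_nil (by omega)]
    rw [List.foldl_nil]
    have : i = (pvRef en 0 doc).length := by rw [pvRef_length en doc 0]; omega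
    rw [this, List.take_length]
  | succ k ih =>
    intro i h1 h2
    rw [PySem.List.pyRange_one_cons (by omega : (i:Int) < (doc.length:Int)), List.foldl_cons]
    rw [pvA_step doc en i h1 (by omega)]
    have hcast : (i:Int) + 1 = ((i+1 : Nat) : Int) := by push_cast; ring
    rw [hcast]
    exact ih (i+1) (by omega) (by omega)

theorem bdl_alt_eq_ref (list_doc : List Int) (encode : Bool) :
    build_differential_list_alt list_doc encode = pvRef encode 0 list_doc := by
  unfold build_differential_list_alt
  rw [(pvSplit_fold list_doc [] []).1]
  simp only [List.nil_append]
  have hch : (if encode == true then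
      ((pvEvens list_doc).zip ((pvEvens list_doc).drop 1)).foldl (fun ch p => ch ++ [p.2 - p.1]) ((pvEvens list_doc).take 1)
    else
      ((pvEvens list_doc).foldl (fun (t : List Int × Int) v => (t.1 ++ [t.2 + v], t.2 + v)) ([], 0)).1)
      = pvChain encode 0 (pvEvens list_doc) := by
    cases encode with
    | true => simpa using pvChain_enc (pvEvens list_doc)
    | false => rw [if_neg (by simp)]; rw [pvChain_dec (pvEvens list_doc) [] 0]; simp
  rw [hch]
  exact pvInterleave encode list_doc 0

theorem bdl_eq_ref (list_doc : List Int) (encode : Bool) (h : list_doc ≠ []) :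
    build_differential_list list_doc encode = pvRef encode 0 list_doc := by
  obtain ⟨d, tl, rfl⟩ : ∃ d tl, list_doc = d :: tl := by
    cases list_doc with
    | nil => exact absurd rfl h
    | cons d tl => exact ⟨d, tl, rfl⟩
  unfold build_differential_list
  have hinit : [PySem.List.pyGetD (d :: tl) 0 0] = (pvRef encode 0 (d :: tl)).take 1 := by
    rw [List.take_add_one, List.take_zero, List.nil_append, pvRef_get?_zero]
    have : PySem.List.pyGetD (d :: tl) 0 0 = d := by
      rw [show (0:Int) = ((0:Nat):Int) from rfl, PySem.List.pyGetD_natCast]; rfl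
    rw [this]
    cases encode <;> simp [pvVal]
  simp only []
  rw [hinit]
  have h1 : ((1:Nat):Int) = (1:Int) := by norm_num
  rw [← h1]
  exact pvA_loop (d :: tl) encode ((d :: tl).length - 1) 1 (by omega) (by simp; omega)

-- ===== VERDICT (by name: the statement is the Claim_ definition above) =====
theorem build_differential_list_spec : Claim_equal_build_differential_list := by
  intro list_doc encode _ hpre
  unfold Spec_build_differential_list
  rw [bdl_eq_ref list_doc encode hpre, bdl_alt_eq_ref]
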